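-- pv_equiv track=rewrite | github.com/JeongGod/Algo-study | 3people/10week/p17686.py | solution
-- ===== SOURCE A (Python) =====
-- def solution(files):
--   answer = []
--   for init, f in enumerate(files):
--     idx = []
--     for i in range(len(f)):
--       if f[i].isdigit():
--         if not idx or idx[-1] + 1 == i:
--           idx.append(i)
--         else:
--           break
--     answer.append([f[:idx[0]], f[idx[0]:idx[-1]+1], f[idx[-1]+1:], init])
--   answer.sort(key=lambda x: (x[0].lower(), int(x[1]), x[3]))
--   for a in answer:
--     a.pop()
--   answer = [''.join(map(str, a)) for a in answer]
--   return answer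
-- ===== SOURCE B (Python) =====
-- def solution(files):
--     groups = {}
--     for f in files:
--         i = 0
--         while i < len(f) and not f[i].isdigit():
--             i += 1
--         j = i
--         while j < len(f) and f[j].isdigit():
--             j += 1
--         k = (f[:i].lower(), int(f[i:j]))
--         groups[k] = groups.get(k, []) + [f]
--     out = []
--     for k in sorted(groups):
--         out.extend(groups[k])
--     return out
-- ===== Notes on version B (the rewrite author's own statement) =====
-- stated objective: alternative
-- what changed: B drops A's decorate-with-index / stable-sort-of-all-items / pop-and-rejoin pipeline: it builds a dictionary grouping the filenames by (head.lower(), int(number)) in one pass, sorts only the DISTINCT keys, and concatenates the groups (each already in original order), so no stability of the sort and no per-element tiebreaker is ever used.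
import Mathlib
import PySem

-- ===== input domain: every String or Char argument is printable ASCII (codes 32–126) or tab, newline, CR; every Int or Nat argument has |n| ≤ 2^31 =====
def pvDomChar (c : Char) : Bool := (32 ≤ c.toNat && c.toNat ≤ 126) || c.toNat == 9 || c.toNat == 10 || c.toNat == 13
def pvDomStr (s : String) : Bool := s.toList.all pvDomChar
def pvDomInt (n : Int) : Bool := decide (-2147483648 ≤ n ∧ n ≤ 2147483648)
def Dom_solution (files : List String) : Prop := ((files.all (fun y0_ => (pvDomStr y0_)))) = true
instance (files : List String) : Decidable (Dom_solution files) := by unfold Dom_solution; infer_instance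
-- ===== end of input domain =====

-- B replaces A's decorate-with-index / stable-sort-all-items / pop-and-rejoin pipeline by a
-- grouping dictionary keyed by (head.lower(), int(number)): only the DISTINCT keys are sorted and
-- the per-key groups (already in original order) are concatenated (alternative algorithm).

-- ===== PORT A =====
-- inner 'for i in range(len(f))' loop building idx, with its break
def pvAIdxGoF : Nat → List Char → List Nat → Nat → List Nat
  | 0, _, idx, _ => idx
  | fuel+1, cs, idx, i =>
    if h : i < cs.length then
      if PySem.Chars.isdigit cs[i] then
        match idx.getLast? with
        | none => pvAIdxGoF fuel cs (idx ++ [i]) (i + 1)          -- 'not idx'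
        | some l => if l + 1 = i then pvAIdxGoF fuel cs (idx ++ [i]) (i + 1) else idx   -- break
      else pvAIdxGoF fuel cs idx (i + 1)
    else idx
def pvAIdxGo (cs : List Char) (idx : List Nat) (i : Nat) : List Nat :=
  pvAIdxGoF (cs.length - i) cs idx i

-- one element of 'answer': [f[:idx[0]], f[idx[0]:idx[-1]+1], f[idx[-1]+1:], init]
-- (idx empty = Python IndexError, excluded by Pre_; the port returns a dummy entry there)
def pvAEntry (init : Int) (f : String) : List Char × List Char × List Char × Int :=
  let cs := f.toList
  let idx := pvAIdxGo cs [] 0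
  match idx.head?, idx.getLast? with
  | some a, some b =>
      (PySem.List.slice cs none (some (a : Int)),
       PySem.List.slice cs (some (a : Int)) (some ((b : Int) + 1)),
       PySem.List.slice cs (some ((b : Int) + 1)) none, init)
  | _, _ => ([], [], [], init)

-- key=lambda x: (x[0].lower(), int(x[1]), x[3])  (Python tuple order = lexicographic)
def pvAKey (e : List Char × List Char × List Char × Int) : Lex ((List Char) × Lex (Int × Int)) :=
  toLex (PySem.Chars.lower e.1, toLex ((PySem.Int.ofChars? e.2.1).getD 0, e.2.2.2))

def solution (files : List String) : List String :=
  let answer := (PySem.List.enumerate files).foldl (fun acc p => acc ++ [pvAEntry p.1 p.2]) []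
  let answer := PySem.List.sorted answer pvAKey
  -- for a in answer: a.pop();  answer = [''.join(map(str, a)) for a in answer]
  answer.map (fun e => String.ofList (e.1 ++ e.2.1 ++ e.2.2.1))

-- ===== PORT B =====
-- first while loop of B: skip to the first digit
def pvBSkipF : Nat → List Char → Nat → Nat
  | 0, _, i => i
  | fuel+1, cs, i =>
    if h : i < cs.length then
      if PySem.Chars.isdigit cs[i] then i else pvBSkipF fuel cs (i + 1)
    else i
def pvBSkip (cs : List Char) (i : Nat) : Nat := pvBSkipF (cs.length - i) cs i

-- second while loop of B: advance past the digit run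
def pvBRunF : Nat → List Char → Nat → Nat
  | 0, _, j => j
  | fuel+1, cs, j =>
    if h : j < cs.length then
      if PySem.Chars.isdigit cs[j] then pvBRunF fuel cs (j + 1) else j
    else j
def pvBRun (cs : List Char) (j : Nat) : Nat := pvBRunF (cs.length - j) cs j

def pvBKey1 (f : String) : List Char :=
  let cs := f.toList
  let i := pvBSkip cs 0
  PySem.Chars.lower (PySem.List.slice cs none (some (i : Int)))

def pvBKey2 (f : String) : Int :=
  let cs := f.toList
  let i := pvBSkip cs 0
  let j := pvBRun cs i
  (PySem.Int.ofChars? (PySem.List.slice cs (some (i : Int)) (some (j : Int)))).getD 0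

-- k = (f[:i].lower(), int(f[i:j]))
def pvKeyOf (f : String) : (List Char) × Int := (pvBKey1 f, pvBKey2 f)

def solution_alt (files : List String) : List String :=
  -- for f in files: groups[k] = groups.get(k, []) + [f]
  let groups := files.foldl (fun d f => d.modify (pvKeyOf f) [] (fun g => g ++ [f]))
    (PySem.Dict.empty : PySem.Dict ((List Char) × Int) (List String))
  -- for k in sorted(groups): out.extend(groups[k])
  (PySem.List.sorted2 groups.keys Prod.fst Prod.snd).foldl
    (fun out k => out ++ groups.getD k []) []

-- ===== PRECONDITION & SPEC =====
-- Pre_ excludes exactly the inputs where A raises: a filename with no digit makes idx empty and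
-- idx[0] raise IndexError (B's int('') would raise ValueError there too).
def Pre_solution (files : List String) : Prop :=
  (files.all (fun f => f.toList.any PySem.Chars.isdigit)) = true
instance (files : List String) : Decidable (Pre_solution files) := by unfold Pre_solution; infer_instance
def pvWitness_solution : List String := ["img12.png", "IMG10 xx", "img2.png"]

def Spec_solution (files : List String) (out : List String) : Prop := out = solution_alt files
instance (files : List String) (out : List String) : Decidable (Spec_solution files out) := by unfold Spec_solution; infer_instance

-- ===== CLAIM (what is proved, stated in full; the proofs are below) =====
def Claim_equal_solution : Prop := ∀ (files : List String), Dom_solution files → Pre_solution files → Spec_solution files (solution files)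

-- ===== LEMMAS AND PROOFS =====

-- canonical parse: position of the first digit, length of its run
def pvPos (cs : List Char) : Nat := (cs.takeWhile (fun c => !PySem.Chars.isdigit c)).length
def pvLen (cs : List Char) : Nat := ((cs.drop (pvPos cs)).takeWhile PySem.Chars.isdigit).length

def pvHasDigit (f : String) : Prop := (f.toList.any PySem.Chars.isdigit) = true

def pvPhi (e : List Char × List Char × List Char × Int) : String :=
  String.ofList (e.1 ++ e.2.1 ++ e.2.2.1)

-- the Bool tests used by the insertion sorts: 3-part entries (A) and 2-part keys (B)
def pvB3 (e e' : List Char × List Char × List Char × Int) : Bool := decide (pvAKey e < pvAKey e')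
def pvB2 (f g : String) : Bool :=
  decide (pvBKey1 f < pvBKey1 g) || !decide (pvBKey1 g < pvBKey1 f) && decide (pvBKey2 f < pvBKey2 g)
def pvBK (a b : (List Char) × Int) : Bool :=
  decide (a.1 < b.1) || !decide (b.1 < a.1) && decide (a.2 < b.2)

-- B's while loops compute the canonical parse positions
theorem pvBSkipF_eq (cs : List Char) (fuel i : Nat) (hf : cs.length - i ≤ fuel) :
    pvBSkipF fuel cs i = i + ((cs.drop i).takeWhile (fun c => !PySem.Chars.isdigit c)).length := by
  induction fuel generalizing i with
  | zero =>
    have : cs.drop i = [] := List.drop_eq_nil_of_le (by omega)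
    simp [pvBSkipF, this]
  | succ fuel ih =>
    rw [pvBSkipF]
    by_cases h : i < cs.length
    · rw [dif_pos h]
      by_cases hd : PySem.Chars.isdigit cs[i]
      · rw [if_pos hd, List.drop_eq_getElem_cons h]
        simp [hd]
      · rw [if_neg hd, ih (i + 1) (by omega), List.drop_eq_getElem_cons h]
        simp only [List.takeWhile_cons, hd, Bool.not_false]
        simp; omega
    · rw [dif_neg h]
      have : cs.drop i = [] := List.drop_eq_nil_of_le (by omega)
      simp [this]

theorem pvBSkip_eq (cs : List Char) (i : Nat) :
    pvBSkip cs i = i + ((cs.drop i).takeWhile (fun c => !PySem.Chars.isdigit c)).length :=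
  pvBSkipF_eq cs (cs.length - i) i (le_refl _)

theorem pvBRunF_eq (cs : List Char) (fuel j : Nat) (hf : cs.length - j ≤ fuel) :
    pvBRunF fuel cs j = j + ((cs.drop j).takeWhile PySem.Chars.isdigit).length := by
  induction fuel generalizing j with
  | zero =>
    have : cs.drop j = [] := List.drop_eq_nil_of_le (by omega)
    simp [pvBRunF, this]
  | succ fuel ih =>
    rw [pvBRunF]
    by_cases h : j < cs.length
    · rw [dif_pos h]
      by_cases hd : PySem.Chars.isdigit cs[j]
      · rw [if_pos hd, ih (j + 1) (by omega), List.drop_eq_getElem_cons h]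
        simp only [List.takeWhile_cons, hd]
        simp; omega
      · rw [if_neg hd, List.drop_eq_getElem_cons h]
        simp [hd]
    · rw [dif_neg h]
      have : cs.drop j = [] := List.drop_eq_nil_of_le (by omega)
      simp [this]

theorem pvBRun_eq (cs : List Char) (j : Nat) :
    pvBRun cs j = j + ((cs.drop j).takeWhile PySem.Chars.isdigit).length :=
  pvBRunF_eq cs (cs.length - j) j (le_refl _)

-- A's inner loop after the run has been broken by a non-digit: idx never changes again
theorem pvAIdxGo_phase3 (cs : List Char) (fuel a k i : Nat) (hk : 0 < k) (hlt : a + k < i) :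
    pvAIdxGoF fuel cs (List.range' a k) i = List.range' a k := by
  induction fuel generalizing i with
  | zero => rfl
  | succ fuel ih =>
    rw [pvAIdxGoF]
    by_cases h : i < cs.length
    · rw [dif_pos h]
      have hlast : (List.range' a k).getLast? = some (a + k - 1) := by
        cases k with
        | zero => omega
        | succ k' => rw [List.range'_concat]; simp
      by_cases hd : PySem.Chars.isdigit cs[i]
      · rw [if_pos hd]
        simp only [hlast]
        rw [if_neg (by omega)]
      · rw [if_neg hd]
        exact ih (i+1) (by omega)
    · rw [dif_neg h]

-- A's inner loop while the run is still contiguous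
theorem pvAIdxGo_phase2 (cs : List Char) (fuel a k i : Nat) (hk : 0 < k) (hi : a + k = i)
    (hf : cs.length - i ≤ fuel) :
    pvAIdxGoF fuel cs (List.range' a k) i =
      List.range' a (k + ((cs.drop i).takeWhile PySem.Chars.isdigit).length) := by
  induction fuel generalizing i k with
  | zero =>
    have hnil : cs.drop i = [] := List.drop_eq_nil_of_le (by omega)
    simp [pvAIdxGoF, hnil]
  | succ fuel ih =>
    rw [pvAIdxGoF]
    by_cases h : i < cs.length
    · rw [dif_pos h]
      have hlast : (List.range' a k).getLast? = some (a + k - 1) := by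
        cases k with
        | zero => omega
        | succ k' => rw [List.range'_concat]; simp
      by_cases hd : PySem.Chars.isdigit cs[i]
      · rw [if_pos hd]
        simp only [hlast]
        rw [if_pos (by omega)]
        have hr : List.range' a k ++ [i] = List.range' a (k+1) := by
          rw [List.range'_concat]; simp; omega
        rw [hr, ih (k+1) (i+1) (by omega) (by omega) (by omega)]
        have htw : ((cs.drop i).takeWhile PySem.Chars.isdigit).length
            = 1 + ((cs.drop (i+1)).takeWhile PySem.Chars.isdigit).length := by
          rw [List.drop_eq_getElem_cons h, List.takeWhile_cons, hd]
          simp; omega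
        rw [htw]
        congr 1
        omega
      · rw [if_neg hd]
        have htw : ((cs.drop i).takeWhile PySem.Chars.isdigit).length = 0 := by
          rw [List.drop_eq_getElem_cons h, List.takeWhile_cons]
          simp [hd]
        rw [htw]
        exact pvAIdxGo_phase3 cs fuel a k (i+1) hk (by omega)
    · rw [dif_neg h]
      have hnil : cs.drop i = [] := List.drop_eq_nil_of_le (by omega)
      simp [hnil]

-- A's inner loop from the initial empty idx
theorem pvAIdxGo_phase1 (cs : List Char) (fuel i : Nat) (hf : cs.length - i ≤ fuel) :
    pvAIdxGoF fuel cs [] i =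
      List.range' (i + ((cs.drop i).takeWhile (fun c => !PySem.Chars.isdigit c)).length)
        (((cs.drop i).dropWhile (fun c => !PySem.Chars.isdigit c)).takeWhile PySem.Chars.isdigit).length := by
  induction fuel generalizing i with
  | zero =>
    have hnil : cs.drop i = [] := List.drop_eq_nil_of_le (by omega)
    simp [pvAIdxGoF, hnil]
  | succ fuel ih =>
    rw [pvAIdxGoF]
    by_cases h : i < cs.length
    · rw [dif_pos h]
      by_cases hd : PySem.Chars.isdigit cs[i]
      · rw [if_pos hd]
        simp only [List.getLast?_nil]
        have h0 : ([] : List Nat) ++ [i] = List.range' i 1 := by simp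
        rw [h0, pvAIdxGo_phase2 cs fuel i 1 (i+1) (by omega) (by omega) (by omega)]
        have htw : ((cs.drop i).takeWhile (fun c => !PySem.Chars.isdigit c)) = [] := by
          rw [List.drop_eq_getElem_cons h, List.takeWhile_cons]
          simp [hd]
        have hdw : ((cs.drop i).dropWhile (fun c => !PySem.Chars.isdigit c))
            = cs[i] :: cs.drop (i+1) := by
          rw [List.drop_eq_getElem_cons h, List.dropWhile_cons]
          simp [hd]
        rw [htw, hdw, List.takeWhile_cons, hd]
        simp
        omega
      · rw [if_neg hd]
        rw [ih (i+1) (by omega)]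
        have htw : ((cs.drop i).takeWhile (fun c => !PySem.Chars.isdigit c))
            = cs[i] :: ((cs.drop (i+1)).takeWhile (fun c => !PySem.Chars.isdigit c)) := by
          rw [List.drop_eq_getElem_cons h, List.takeWhile_cons]
          simp [hd]
        have hdw : ((cs.drop i).dropWhile (fun c => !PySem.Chars.isdigit c))
            = ((cs.drop (i+1)).dropWhile (fun c => !PySem.Chars.isdigit c)) := by
          rw [List.drop_eq_getElem_cons h, List.dropWhile_cons]
          simp [hd]
        rw [htw, hdw]
        congr 1
        simp
        omega
    · rw [dif_neg h]
      have hnil : cs.drop i = [] := List.drop_eq_nil_of_le (by omega)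
      simp [hnil]

-- dropping the head-part is the dropWhile
theorem pvDrop_pos (cs : List Char) :
    cs.drop (pvPos cs) = cs.dropWhile (fun c => !PySem.Chars.isdigit c) := by
  induction cs with
  | nil => rfl
  | cons c t ih =>
    by_cases hc : PySem.Chars.isdigit c
    · simp [pvPos, hc]
    · simp only [pvPos, List.takeWhile_cons, List.dropWhile_cons, hc] at *
      simpa using ih

theorem pvLen_pos {f : String} (h : pvHasDigit f) : 0 < pvLen f.toList := by
  rw [pvLen, pvDrop_pos]
  rcases List.any_eq_true.mp h with ⟨c, hc, hdc⟩
  have hne : f.toList.dropWhile (fun c => !PySem.Chars.isdigit c) ≠ [] := by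
    intro hnil
    have := List.dropWhile_eq_nil_iff.mp hnil c hc
    simp [hdc] at this
  rcases List.exists_cons_of_ne_nil hne with ⟨d, t, hdt⟩
  have hd : PySem.Chars.isdigit d = true := by
    have := List.head_dropWhile_not (l := f.toList) (p := fun c => !PySem.Chars.isdigit c) hne
    simp [hdt] at this
    exact this
  rw [hdt, List.takeWhile_cons, hd]
  simp

-- A's idx is exactly the first maximal digit run
theorem pvIdx_eq (f : String) :
    pvAIdxGo f.toList [] 0 = List.range' (pvPos f.toList) (pvLen f.toList) := by
  have := pvAIdxGo_phase1 f.toList (f.toList.length - 0) 0 (le_refl _)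
  rw [List.drop_zero] at this
  rw [pvAIdxGo, this, pvPos, pvLen, pvDrop_pos]
  simp

-- characterization of A's answer entry on a name that has a digit
theorem pvAEntry_eq (m : Int) (f : String) (h : pvHasDigit f) :
    pvAEntry m f = (f.toList.take (pvPos f.toList),
                    (f.toList.drop (pvPos f.toList)).take (pvLen f.toList),
                    f.toList.drop (pvPos f.toList + pvLen f.toList), m) := by
  have hL := pvLen_pos h
  obtain ⟨L', hL'⟩ : ∃ L', pvLen f.toList = L' + 1 := ⟨pvLen f.toList - 1, by omega⟩
  have hidx : pvAIdxGo f.toList [] 0 = List.range' (pvPos f.toList) (L' + 1) := by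
    rw [pvIdx_eq, hL']
  have hhead : (List.range' (pvPos f.toList) (L' + 1)).head? = some (pvPos f.toList) := by
    rw [List.range'_succ]; rfl
  have hlast : (List.range' (pvPos f.toList) (L' + 1)).getLast? = some (pvPos f.toList + L') := by
    rw [List.range'_concat]; simp
  have e1 : PySem.List.slice f.toList none (some ((pvPos f.toList : Nat) : Int))
      = f.toList.take (pvPos f.toList) := PySem.List.slice_to_natCast _ _
  have hcast : ((pvPos f.toList + L' : Nat) : Int) + 1 = ((pvPos f.toList + L' + 1 : Nat) : Int) := by
    push_cast; ring
  have e2 : PySem.List.slice f.toList (some ((pvPos f.toList : Nat) : Int))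
        (some (((pvPos f.toList + L' : Nat) : Int) + 1))
      = (f.toList.drop (pvPos f.toList)).take (L' + 1) := by
    rw [hcast, PySem.List.slice_natCast]
    have harg : pvPos f.toList + L' + 1 - pvPos f.toList = L' + 1 := by omega
    rw [harg]
  have e3 : PySem.List.slice f.toList (some (((pvPos f.toList + L' : Nat) : Int) + 1)) none
      = f.toList.drop (pvPos f.toList + (L' + 1)) := by
    rw [hcast, PySem.List.slice_from_natCast]
    have harg : pvPos f.toList + (L' + 1) = pvPos f.toList + L' + 1 := by omega
    rw [harg]
  rw [pvAEntry]
  simp only [hidx, hhead, hlast, e1, e2, e3, hL']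

-- the three slices of an entry recombine to the original name
theorem pvRecombine (m : Int) (f : String) (h : pvHasDigit f) : pvPhi (pvAEntry m f) = f := by
  rw [pvPhi, pvAEntry_eq m f h]
  have : (f.toList.drop (pvPos f.toList)).take (pvLen f.toList)
        ++ f.toList.drop (pvPos f.toList + pvLen f.toList)
      = f.toList.drop (pvPos f.toList) := by
    rw [← List.drop_drop]
    exact List.take_append_drop _ _
  simp only [List.append_assoc, this, List.take_append_drop]
  simp

-- B's two key components, computed on f, match A's key components stored in the entry
theorem pvBKey1_eq (m : Int) (f : String) (h : pvHasDigit f) :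
    pvBKey1 f = PySem.Chars.lower (pvAEntry m f).1 := by
  rw [pvAEntry_eq m f h, pvBKey1]
  have hs : pvBSkip f.toList 0 = pvPos f.toList := by
    rw [pvBSkip_eq]; simp [pvPos]
  simp only [hs]
  rw [PySem.List.slice_to_natCast]

theorem pvBKey2_eq (m : Int) (f : String) (h : pvHasDigit f) :
    pvBKey2 f = (PySem.Int.ofChars? (pvAEntry m f).2.1).getD 0 := by
  rw [pvAEntry_eq m f h, pvBKey2]
  have hs : pvBSkip f.toList 0 = pvPos f.toList := by
    rw [pvBSkip_eq]; simp [pvPos]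
  simp only [hs]
  rw [PySem.List.slice_natCast]
  have harg : pvBRun f.toList (pvPos f.toList) - pvPos f.toList = pvLen f.toList := by
    rw [pvBRun_eq, pvLen]; omega
  rw [harg]

-- Python's 3-tuple key comparison collapses to the 2-tuple one when the third components are ordered
theorem pvLex3_eq (K1 K1' : List Char) (K2 K2' m m' : Int) (hm : m' < m) :
    decide (toLex (K1, toLex (K2, m)) < toLex (K1', toLex (K2', m'))) =
      (decide (K1 < K1') || !decide (K1' < K1) && decide (K2 < K2')) := by
  rcases lt_trichotomy K1 K1' with h | h | h
  · simp [Prod.Lex.lt_iff, h]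
  · subst h
    have hmm : ¬ m < m' := by omega
    simp [Prod.Lex.lt_iff, hmm]
  · have h1 : ¬ K1 < K1' := lt_asymm h
    have h2 : K1 ≠ K1' := ne_of_gt h
    simp [Prod.Lex.lt_iff, h, h1, h2]

-- on entries with a strictly larger index, A's three-part key compares like B's two-part key
theorem pvB3_eq_pvB2 (m m' : Int) (f f' : String) (hf : pvHasDigit f) (hf' : pvHasDigit f')
    (hm : m' < m) : pvB3 (pvAEntry m f) (pvAEntry m' f') = pvB2 f f' := by
  have k1 := pvBKey1_eq m f hf
  have k1' := pvBKey1_eq m' f' hf'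
  have k2 := pvBKey2_eq m f hf
  have k2' := pvBKey2_eq m' f' hf'
  have hinit : (pvAEntry m f).2.2.2 = m := by rw [pvAEntry_eq m f hf]
  have hinit' : (pvAEntry m' f').2.2.2 = m' := by rw [pvAEntry_eq m' f' hf']
  rw [pvB3, pvB2, pvAKey, pvAKey, hinit, hinit', ← k1, ← k1', ← k2, ← k2']
  exact pvLex3_eq _ _ _ _ _ _ hm

theorem pvMap_insertBy {α β : Type} (φ : α → β) (b3 : α → α → Bool) (b2 : β → β → Bool)
    (x : α) (ys : List α) (hx : ∀ y ∈ ys, b3 x y = b2 (φ x) (φ y)) :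
    (PySem.List.insertBy b3 x ys).map φ = PySem.List.insertBy b2 (φ x) (ys.map φ) := by
  induction ys with
  | nil => rfl
  | cons y ys ih =>
    rw [PySem.List.insertBy, List.map_cons, PySem.List.insertBy]
    rw [hx y (List.mem_cons_self)]
    by_cases hb : b2 (φ x) (φ y)
    · rw [if_pos hb, if_pos hb]
      rfl
    · rw [if_neg hb, if_neg hb]
      rw [List.map_cons, ih (fun z hz => hx z (List.mem_cons_of_mem _ hz))]

theorem pvFoldMain (rest : List String) (n : Int) (acc : List (List Char × List Char × List Char × Int))
    (hrest : ∀ f ∈ rest, pvHasDigit f)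
    (hacc : ∀ e ∈ acc, ∃ m g, e = pvAEntry m g ∧ pvHasDigit g ∧ m < n) :
    (((PySem.List.enumerate rest n).map (fun p => pvAEntry p.1 p.2)).foldl
        (fun a e => PySem.List.insertBy pvB3 e a) acc).map pvPhi
      = rest.foldl (fun a f => PySem.List.insertBy pvB2 f a) (acc.map pvPhi) := by
  induction rest generalizing n acc with
  | nil => rfl
  | cons f rest ih =>
    have hf : pvHasDigit f := hrest f (List.mem_cons_self)
    rw [PySem.List.enumerate, List.map_cons, List.foldl_cons, List.foldl_cons]
    have hmap : (PySem.List.insertBy pvB3 (pvAEntry n f) acc).map pvPhi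
        = PySem.List.insertBy pvB2 f (acc.map pvPhi) := by
      have := pvMap_insertBy pvPhi pvB3 pvB2 (pvAEntry n f) acc (fun y hy => by
        rcases hacc y hy with ⟨m, g, rfl, hg, hmn⟩
        rw [pvRecombine m g hg, pvRecombine n f hf]
        exact pvB3_eq_pvB2 n m f g hf hg hmn)
      rw [this, pvRecombine n f hf]
    rw [ih (n + 1) _ (fun g hg => hrest g (List.mem_cons_of_mem _ hg))
      (fun e he => by
        rcases (PySem.List.mem_insertBy pvB3 (pvAEntry n f) e acc).mp he with rfl | he'
        · exact ⟨n, f, rfl, hf, by omega⟩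
        · rcases hacc e he' with ⟨m, g, rfl, hg, hmn⟩
          exact ⟨m, g, rfl, hg, by omega⟩), hmap]

-- ========== B-side: grouping dict + sort of distinct keys equals the stable sort ==========

-- the group of key k: the files with that key, in original order
def pvG (fs : List String) (k : (List Char) × Int) : List String :=
  fs.filter (fun f => pvKeyOf f == k)

-- the hand-rolled key insertion sort (what sorted2 over the keys unfolds to)
def pvKeySort (ks : List ((List Char) × Int)) : List ((List Char) × Int) :=
  ks.foldl (fun acc k => PySem.List.insertBy pvBK k acc) []

-- sorted distinct keys of fs
def pvS (fs : List String) : List ((List Char) × Int) :=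
  pvKeySort (PySem.Set.ofList (fs.map pvKeyOf))

theorem pvBK_eq (a b : (List Char) × Int) : pvBK a b = decide (toLex a < toLex b) := by
  rcases lt_trichotomy a.1 b.1 with h | h | h
  · simp [pvBK, Prod.Lex.lt_iff, h]
  · simp [pvBK, Prod.Lex.lt_iff, h]
  · have h1 : ¬ a.1 < b.1 := lt_asymm h
    have h2 : ¬ a.1 = b.1 := ne_of_gt h
    simp [pvBK, Prod.Lex.lt_iff, h, h1, h2]

theorem pvB2_eq_pvBK (f g : String) : pvB2 f g = pvBK (pvKeyOf f) (pvKeyOf g) := by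
  simp only [pvB2, pvBK, pvKeyOf]
  rfl

theorem pvKeySort_eq_sorted (ks : List ((List Char) × Int)) :
    pvKeySort ks = PySem.List.sorted ks (fun k => toLex k) false := by
  rw [PySem.List.sorted_eq_foldl_insertBy, pvKeySort]
  have : pvBK = fun a b => decide ((toLex a) < (toLex b)) := by
    funext a b; exact pvBK_eq a b
  rw [this]

theorem pvKeySort_perm (ks : List ((List Char) × Int)) : (pvKeySort ks).Perm ks := by
  rw [pvKeySort_eq_sorted]; exact PySem.List.sorted_perm _ _ _

theorem pvKeySort_pairwise (ks : List ((List Char) × Int)) (hnd : ks.Nodup) :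
    (pvKeySort ks).Pairwise (fun a b => toLex a < toLex b) := by
  have hle := PySem.List.sorted_pairwise ks (fun k => toLex k)
  rw [← pvKeySort_eq_sorted] at hle
  have hnd' : (pvKeySort ks).Nodup := ((pvKeySort_perm ks).nodup_iff).mpr hnd
  have := List.Pairwise.and hle hnd'
  exact this.imp (fun {a b} h => lt_of_le_of_ne h.1 (by simpa using h.2))

-- insertBy skips a prefix it compares false against
theorem pvInsertBy_append {α : Type} (b : α → α → Bool) (x : α) (L1 L2 : List α)
    (h : ∀ y ∈ L1, b x y = false) :
    PySem.List.insertBy b x (L1 ++ L2) = L1 ++ PySem.List.insertBy b x L2 := by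
  induction L1 with
  | nil => rfl
  | cons y L1 ih =>
    rw [List.cons_append, PySem.List.insertBy, h y (List.mem_cons_self), List.cons_append,
      ih (fun z hz => h z (List.mem_cons_of_mem _ hz))]
    rfl

-- insertBy puts x in front when it compares true against everything
theorem pvInsertBy_front {α : Type} (b : α → α → Bool) (x : α) (L : List α)
    (h : ∀ y ∈ L, b x y = true) :
    PySem.List.insertBy b x L = x :: L := by
  cases L with
  | nil => rfl
  | cons y L =>
    rw [PySem.List.insertBy, h y (List.mem_cons_self)]
    rfl

-- split of a strictly sorted key list at a member
theorem pvSplit_mem (S : List ((List Char) × Int)) (κ : (List Char) × Int)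
    (hp : S.Pairwise (fun a b => toLex a < toLex b)) (hκ : κ ∈ S) :
    ∃ S1 S2, S = S1 ++ κ :: S2 ∧ (∀ k ∈ S1, toLex k < toLex κ) ∧ (∀ k ∈ S2, toLex κ < toLex k) := by
  rcases List.append_of_mem hκ with ⟨S1, S2, rfl⟩
  rw [List.pairwise_append] at hp
  rcases hp with ⟨_, hp2, hcross⟩
  rw [List.pairwise_cons] at hp2
  exact ⟨S1, S2, rfl, fun k hk => hcross k hk κ (List.mem_cons_self), fun k hk => hp2.1 k hk⟩

-- inserting a fresh key into a strictly sorted list: where it lands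
theorem pvInsert_not_mem (S : List ((List Char) × Int)) (κ : (List Char) × Int)
    (hp : S.Pairwise (fun a b => toLex a < toLex b)) (hκ : κ ∉ S) :
    ∃ S1 S2, S = S1 ++ S2 ∧ PySem.List.insertBy pvBK κ S = S1 ++ κ :: S2 ∧
      (∀ k ∈ S1, toLex k < toLex κ) ∧ (∀ k ∈ S2, toLex κ < toLex k) := by
  induction S with
  | nil => exact ⟨[], [], rfl, rfl, by simp, by simp⟩
  | cons k S ih =>
    rw [List.pairwise_cons] at hp
    by_cases hb : toLex κ < toLex k
    · have hfront : PySem.List.insertBy pvBK κ (k :: S) = κ :: k :: S := by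
        apply pvInsertBy_front
        intro y hy
        rw [pvBK_eq]
        rcases List.mem_cons.mp hy with rfl | hy'
        · simpa using hb
        · simpa using lt_trans hb (hp.1 y hy')
      refine ⟨[], k :: S, rfl, hfront, by simp, ?_⟩
      · intro k' hk'
        rcases List.mem_cons.mp hk' with rfl | hk''
        · exact hb
        · exact lt_trans hb (hp.1 k' hk'')
    · have hne : toLex κ ≠ toLex k := by
        simpa using (fun h : κ = k => hκ (h ▸ List.mem_cons_self))
      have hkκ : toLex k < toLex κ := lt_of_le_of_ne (le_of_not_gt hb) (Ne.symm hne)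
      rcases ih hp.2 (fun h => hκ (List.mem_cons_of_mem _ h)) with ⟨S1, S2, hS, hins, h1, h2⟩
      refine ⟨k :: S1, S2, by rw [List.cons_append, ← hS], ?_, ?_, h2⟩
      · rw [PySem.List.insertBy, pvBK_eq]
        have : ¬ toLex κ < toLex k := hb
        simp only [this, decide_false]
        rw [hins, List.cons_append]
        rfl
      · intro k' hk'
        rcases List.mem_cons.mp hk' with rfl | hk''
        · exact hkκ
        · exact h1 k' hk''

-- every element of a group has that key
theorem pvKey_of_mem_G (fs : List String) (k : (List Char) × Int) (g : String)
    (hg : g ∈ pvG fs k) : pvKeyOf g = k := by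
  rcases List.mem_filter.mp hg with ⟨_, hbeq⟩
  exact eq_of_beq hbeq

-- groups over the extended list, away from the new key
theorem pvG_append_ne (fs : List String) (f : String) (k : (List Char) × Int)
    (hne : k ≠ pvKeyOf f) : pvG (fs ++ [f]) k = pvG fs k := by
  rw [pvG, List.filter_append, pvG]
  have : (pvKeyOf f == k) = false := by
    simpa using (fun h : pvKeyOf f = k => hne h.symm)
  simp [this]

theorem pvG_append_self (fs : List String) (f : String) :
    pvG (fs ++ [f]) (pvKeyOf f) = pvG fs (pvKeyOf f) ++ [f] := by
  rw [pvG, List.filter_append, pvG]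
  simp

-- appending a file leaves the groups of all other keys unchanged
theorem pvFlatMap_ne (fs : List String) (f : String) (S' : List ((List Char) × Int))
    (h : ∀ k ∈ S', k ≠ pvKeyOf f) :
    S'.flatMap (pvG (fs ++ [f])) = S'.flatMap (pvG fs) := by
  induction S' with
  | nil => rfl
  | cons k S' ih =>
    rw [List.flatMap_cons, List.flatMap_cons, pvG_append_ne fs f k (h k List.mem_cons_self),
      ih (fun k' hk' => h k' (List.mem_cons_of_mem _ hk'))]

-- MAIN: the stable insertion sort of the files equals the concatenation of the groups
-- in sorted-distinct-key order
theorem pvMain (fs : List String) :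
    fs.foldl (fun a f => PySem.List.insertBy pvB2 f a) [] = (pvS fs).flatMap (pvG fs) := by
  induction fs using List.reverseRecOn with
  | nil => rfl
  | append_singleton fs f ih =>
    rw [List.foldl_append, List.foldl_cons, List.foldl_nil, ih]
    have hnd0 : (PySem.Set.ofList (fs.map pvKeyOf)).Nodup := PySem.Set.nodup_ofList _
    have hpair : (pvS fs).Pairwise (fun a b => toLex a < toLex b) := pvKeySort_pairwise _ hnd0
    have hperm : (pvS fs).Perm (PySem.Set.ofList (fs.map pvKeyOf)) := pvKeySort_perm _
    have hkeys : ((fs ++ [f]).map pvKeyOf) = fs.map pvKeyOf ++ [pvKeyOf f] := by simp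
    by_cases hmem : pvKeyOf f ∈ PySem.Set.ofList (fs.map pvKeyOf)
    · -- key already present: same sorted key list, f appended at the end of its group
      have hS' : pvS (fs ++ [f]) = pvS fs := by
        rw [pvS, hkeys, PySem.Set.ofList_append_singleton, PySem.Set.add_of_mem hmem]
        rfl
      have hmemS : pvKeyOf f ∈ pvS fs := hperm.mem_iff.mpr hmem
      rcases pvSplit_mem (pvS fs) (pvKeyOf f) hpair hmemS with ⟨S1, S2, hsplit, h1, h2⟩
      rw [hS', hsplit]
      have hins : PySem.List.insertBy pvB2 f
            ((S1.flatMap (pvG fs) ++ pvG fs (pvKeyOf f)) ++ S2.flatMap (pvG fs))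
          = (S1.flatMap (pvG fs) ++ pvG fs (pvKeyOf f)) ++ f :: S2.flatMap (pvG fs) := by
        rw [pvInsertBy_append]
        · congr 1
          apply pvInsertBy_front
          intro y hy
          rcases List.mem_flatMap.mp hy with ⟨k, hk, hyk⟩
          rw [pvB2_eq_pvBK, pvKey_of_mem_G fs k y hyk, pvBK_eq]
          simpa using h2 k hk
        · intro y hy
          rcases List.mem_append.mp hy with hy' | hy'
          · rcases List.mem_flatMap.mp hy' with ⟨k, hk, hyk⟩
            rw [pvB2_eq_pvBK, pvKey_of_mem_G fs k y hyk, pvBK_eq]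
            simpa using le_of_lt (h1 k hk)
          · rw [pvB2_eq_pvBK, pvKey_of_mem_G fs (pvKeyOf f) y hy', pvBK_eq]
            simp
      calc PySem.List.insertBy pvB2 f ((S1 ++ pvKeyOf f :: S2).flatMap (pvG fs))
          = PySem.List.insertBy pvB2 f
              ((S1.flatMap (pvG fs) ++ pvG fs (pvKeyOf f)) ++ S2.flatMap (pvG fs)) := by
            rw [List.flatMap_append, List.flatMap_cons, List.append_assoc]
        _ = (S1.flatMap (pvG fs) ++ pvG fs (pvKeyOf f)) ++ f :: S2.flatMap (pvG fs) := hins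
        _ = (S1 ++ pvKeyOf f :: S2).flatMap (pvG (fs ++ [f])) := by
            rw [List.flatMap_append, List.flatMap_cons,
              pvFlatMap_ne fs f S1 (fun k hk he => lt_irrefl _ (he ▸ h1 k hk)),
              pvFlatMap_ne fs f S2 (fun k hk he => lt_irrefl _ (he ▸ h2 k hk)),
              pvG_append_self]
            simp [List.append_assoc]
    · -- fresh key: it is inserted into the sorted key list and forms the group [f]
      have hnotmap : pvKeyOf f ∉ fs.map pvKeyOf := by
        intro h; exact hmem ((PySem.Set.mem_ofList _ _).mpr h)
      have hS' : pvS (fs ++ [f]) = PySem.List.insertBy pvBK (pvKeyOf f) (pvS fs) := by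
        rw [pvS, hkeys, PySem.Set.ofList_append_singleton, PySem.Set.add_of_not_mem hmem,
          pvKeySort, List.foldl_append, List.foldl_cons, List.foldl_nil]
        rfl
      have hnotS : pvKeyOf f ∉ pvS fs := fun h => hmem (hperm.mem_iff.mp h)
      rcases pvInsert_not_mem (pvS fs) (pvKeyOf f) hpair hnotS with ⟨S1, S2, hsplit, hins, h1, h2⟩
      have hGnil : pvG fs (pvKeyOf f) = [] := by
        rw [pvG, List.filter_eq_nil_iff]
        intro g hg hbeq
        exact hnotmap (by rw [← eq_of_beq hbeq]; exact List.mem_map_of_mem hg)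
      rw [hS', hins, hsplit]
      have hinsL : PySem.List.insertBy pvB2 f (S1.flatMap (pvG fs) ++ S2.flatMap (pvG fs))
          = S1.flatMap (pvG fs) ++ f :: S2.flatMap (pvG fs) := by
        rw [pvInsertBy_append]
        · congr 1
          apply pvInsertBy_front
          intro y hy
          rcases List.mem_flatMap.mp hy with ⟨k, hk, hyk⟩
          rw [pvB2_eq_pvBK, pvKey_of_mem_G fs k y hyk, pvBK_eq]
          simpa using h2 k hk
        · intro y hy
          rcases List.mem_flatMap.mp hy with ⟨k, hk, hyk⟩
          rw [pvB2_eq_pvBK, pvKey_of_mem_G fs k y hyk, pvBK_eq]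
          simpa using le_of_lt (h1 k hk)
      calc PySem.List.insertBy pvB2 f ((S1 ++ S2).flatMap (pvG fs))
          = S1.flatMap (pvG fs) ++ f :: S2.flatMap (pvG fs) := by
            rw [List.flatMap_append]; exact hinsL
        _ = (S1 ++ pvKeyOf f :: S2).flatMap (pvG (fs ++ [f])) := by
            rw [List.flatMap_append, List.flatMap_cons,
              pvFlatMap_ne fs f S1 (fun k hk he => lt_irrefl _ (he ▸ h1 k hk)),
              pvFlatMap_ne fs f S2 (fun k hk he => lt_irrefl _ (he ▸ h2 k hk)),
              pvG_append_self, hGnil]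
            simp

-- B's dict holds exactly the groups, its key list the distinct keys
theorem pvAlt_eq (files : List String) :
    solution_alt files = (pvS files).flatMap (pvG files) := by
  rw [solution_alt]
  have hpair : files.foldl (fun d f => d.modify (pvKeyOf f) [] (fun g => g ++ [f]))
        (PySem.Dict.empty : PySem.Dict ((List Char) × Int) (List String))
      = (files.map (fun f => (pvKeyOf f, f))).foldl
          (fun d p => d.modify p.1 [] (fun g => g ++ [p.2])) PySem.Dict.empty := by
    rw [List.foldl_map]
  have hkeys : (files.foldl (fun d f => d.modify (pvKeyOf f) [] (fun g => g ++ [f]))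
        (PySem.Dict.empty : PySem.Dict ((List Char) × Int) (List String))).keys
      = PySem.Set.ofList (files.map pvKeyOf) := by
    rw [PySem.Dict.keys_foldl_modify_key]
    simp [PySem.Set.update_nil_left]
  have hgetD : ∀ k, (files.foldl (fun d f => d.modify (pvKeyOf f) [] (fun g => g ++ [f]))
        (PySem.Dict.empty : PySem.Dict ((List Char) × Int) (List String))).getD k []
      = pvG files k := by
    intro k
    rw [hpair, PySem.Dict.getD_foldl_modify_append, PySem.Dict.getD_empty, List.nil_append,
      List.filter_map, List.map_map, pvG]
    simp [Function.comp_def]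
  rw [PySem.List.foldl_append_eq_flatMap, List.nil_append]
  simp only [hgetD, hkeys]
  rfl

-- ===== VERDICT (by name: the statement is the Claim_ definition above) =====
theorem solution_spec : Claim_equal_solution := by
  intro files _hdom hpre
  have hall : ∀ f ∈ files, pvHasDigit f := by
    intro f hf
    exact List.all_eq_true.mp hpre f hf
  show solution files = solution_alt files
  rw [solution, pvAlt_eq]
  simp only [PySem.List.foldl_append_singleton_eq_map, List.nil_append]
  rw [PySem.List.sorted_eq_foldl_insertBy]
  show (((PySem.List.enumerate files 0).map (fun p => pvAEntry p.1 p.2)).foldl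
      (fun a e => PySem.List.insertBy pvB3 e a) []).map pvPhi
    = (pvS files).flatMap (pvG files)
  rw [pvFoldMain files 0 [] hall (by simp), ← pvMain]
  rfl
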